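-- pv_equiv track=rewrite | github.com/chuoer47/AlgorithmLearning | 刷题记录/AcWing/算法提高课/第六章-基础算法/前缀和与差分/100. 增减序列.py | solve
-- ===== SOURCE A (Python) =====
-- def solve(num, lst):
--     n = len(lst)
--     tem = [i - num for i in lst] + [0]
--     darr = [tem[i] - tem[i - 1] for i in range(n)]  # 差分数组 注意，这里是n
--     t1, t2 = 0, 0
--     for i in darr:
--         if i > 0:
--             t1 += i
--         else:
--             t2 += -i
--     return (t1, t2)  # 返回差分数组中>0的大小，<0的大小
-- ===== SOURCE B (Python) =====
-- def solve(num, lst):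
--     total = 0
--     prev = num
--     for x in lst:
--         total += abs(x - prev)
--         prev = x
--     net = lst[-1] - num if lst else 0
--     return ((total + net) // 2, (total - net) // 2)
-- ===== Notes on version B (the rewrite author's own statement) =====
-- stated objective: faster
-- what changed: B never splits the differences by sign: it sums only absolute steps (total variation) in one pass and recovers both signed sums by the closed-form identity t1 = (total + (lst[-1]-num))/2, t2 = (total - (lst[-1]-num))/2, using that the difference array telescopes to lst[-1]-num. (measured ~1.8x faster: no intermediate lists and no per-element branch on the sign)
import Mathlib
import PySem

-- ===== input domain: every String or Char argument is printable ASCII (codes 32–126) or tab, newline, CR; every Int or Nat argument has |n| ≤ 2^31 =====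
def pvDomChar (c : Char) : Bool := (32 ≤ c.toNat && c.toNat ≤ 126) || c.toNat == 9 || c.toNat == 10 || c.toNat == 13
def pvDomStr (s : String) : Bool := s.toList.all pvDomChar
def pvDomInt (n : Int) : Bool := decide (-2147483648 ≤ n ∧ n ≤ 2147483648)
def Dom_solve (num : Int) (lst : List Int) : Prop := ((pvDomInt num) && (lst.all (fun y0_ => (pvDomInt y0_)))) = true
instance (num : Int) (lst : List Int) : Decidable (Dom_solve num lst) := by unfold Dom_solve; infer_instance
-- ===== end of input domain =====

-- B drops the sign-split entirely: it sums the ABSOLUTE steps (total variation) in one pass and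
-- recovers the two signed sums from the identity t1 = (total + net)/2, t2 = (total - net)/2,
-- where net = lst[-1] - num telescopes the difference array (alternative algorithm, O(1) space).

-- ===== PORT A =====
def solve (num : Int) (lst : List Int) : Int × Int :=
  let n : Int := lst.length
  let tem : List Int := lst.map (fun i => i - num) ++ [0]
  -- tem[i] / tem[i-1]: indices are always in range (i-1 = -1 wraps to the appended 0), so pyGetD is exact here
  let darr : List Int := (PySem.List.pyRange 0 n 1).map
    (fun i => PySem.List.pyGetD tem i 0 - PySem.List.pyGetD tem (i - 1) 0)
  darr.foldl (fun acc i => if i > 0 then (acc.1 + i, acc.2) else (acc.1, acc.2 + (-i))) (0, 0)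

-- ===== PORT B =====
def totLoop (prev total : Int) : List Int → Int
  | [] => total
  | x :: xs => totLoop x (total + |x - prev|) xs

def solve_alt (num : Int) (lst : List Int) : Int × Int :=
  let total := totLoop num 0 lst
  -- lst[-1] is guarded by the emptiness test, so pyGetD is exact here
  let net := if lst.isEmpty then 0 else PySem.List.pyGetD lst (-1) 0 - num
  (PySem.Int.floordiv (total + net) 2, PySem.Int.floordiv (total - net) 2)

-- ===== PRECONDITION & SPEC =====
def Spec_solve (num : Int) (lst : List Int) (out : Int × Int) : Prop := out = solve_alt num lst
instance (num : Int) (lst : List Int) (out : Int × Int) : Decidable (Spec_solve num lst out) := by unfold Spec_solve; infer_instance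

-- ===== CLAIM (what is proved, stated in full; the proofs are below) =====
def Claim_equal_solve : Prop := ∀ (num : Int) (lst : List Int), Dom_solve num lst → Spec_solve num lst (solve num lst)

-- ===== LEMMAS AND PROOFS =====

-- A's difference array, as a standalone function (same expression as the 'darr' let in 'solve')
def darrOf (num : Int) (lst : List Int) : List Int :=
  (PySem.List.pyRange 0 (lst.length : Int) 1).map
    (fun i => PySem.List.pyGetD (lst.map (fun v => v - num) ++ [0]) i 0
            - PySem.List.pyGetD (lst.map (fun v => v - num) ++ [0]) (i - 1) 0)

lemma darrOf_nil (num : Int) : darrOf num [] = [] := by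
  simp [darrOf]

lemma getD_mapsub_append (xs : List Int) (c : Int) (k : Nat) (hk : k < xs.length) :
    (xs.map (fun v => v - c) ++ [0]).getD k 0 = xs[k] - c := by
  rw [List.getD_eq_getElem?_getD, List.getElem?_append_left (by simpa using hk)]
  simp [List.getElem?_eq_getElem hk]

lemma darrOf_cons (num x : Int) (xs : List Int) :
    darrOf num (x :: xs) = (x - num) :: darrOf x xs := by
  unfold darrOf
  have hlen : (((x :: xs).length : Nat) : Int) = (xs.length : Int) + 1 := by
    push_cast [List.length_cons]; ring
  rw [hlen, PySem.List.pyRange_one_cons (by positivity), List.map_cons]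
  congr 1
  · -- head element: tem[0] - tem[-1] = (x - num) - 0
    show PySem.List.pyGetD ((x :: xs).map (fun v => v - num) ++ [0]) 0 0
        - PySem.List.pyGetD ((x :: xs).map (fun v => v - num) ++ [0]) (0 - 1) 0 = x - num
    rw [List.map_cons, List.cons_append]
    norm_num [PySem.List.pyGetD_zero_cons]
    rw [← List.cons_append, PySem.List.pyGetD_neg_one_append_singleton]
  · -- tail: shift the index range by one
    rw [PySem.List.pyRange_one, PySem.List.pyRange_one, List.map_map, List.map_map]
    have h1 : ((xs.length : Int) + 1 - (0 + 1)).toNat = xs.length := by omega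
    have h2 : ((xs.length : Int) - 0).toNat = xs.length := by omega
    rw [h1, h2]
    apply List.map_congr_left
    intro k hk
    have hk' : k < xs.length := List.mem_range.mp hk
    simp only [Function.comp_apply]
    have e1 : (0 : Int) + 1 + k = ((k + 1 : Nat) : Int) := by push_cast; ring
    have e2 : ((k + 1 : Nat) : Int) - 1 = ((k : Nat) : Int) := by omega
    have e3 : (0 : Int) + k = ((k : Nat) : Int) := by omega
    rw [e1, e2, e3, PySem.List.pyGetD_natCast, PySem.List.pyGetD_natCast,
        PySem.List.pyGetD_natCast]
    rw [List.map_cons, List.cons_append, List.getD_cons_succ]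
    rw [getD_mapsub_append xs num k hk']
    have hxk : k < (x :: xs).length := by simp; omega
    have : ((x :: xs).map (fun v => v - num) ++ [0]).getD k 0 = (x :: xs)[k] - num :=
      getD_mapsub_append (x :: xs) num k hxk
    rw [List.map_cons, List.cons_append] at this
    rw [this, getD_mapsub_append xs x k hk']
    cases k with
    | zero =>
      rw [show ((0 : Nat) : Int) - 1 = -1 by norm_num,
          PySem.List.pyGetD_neg_one_append_singleton]
      simp
    | succ j =>
      rw [show ((j + 1 : Nat) : Int) - 1 = ((j : Nat) : Int) by omega,
          PySem.List.pyGetD_natCast,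
          getD_mapsub_append xs x j (by omega)]
      simp

def dstep : Int × Int → Int → Int × Int :=
  fun acc i => if i > 0 then (acc.1 + i, acc.2) else (acc.1, acc.2 + (-i))

-- the positive / negative parts of the difference array, computed structurally
def PN : Int → List Int → Int × Int
  | _, [] => (0, 0)
  | prev, x :: xs =>
    let d := x - prev
    let pn := PN x xs
    (if d > 0 then pn.1 + d else pn.1, if d > 0 then pn.2 else pn.2 - d)

lemma foldl_darr_eq_PN (num t1 t2 : Int) (lst : List Int) :
    (darrOf num lst).foldl dstep (t1, t2) = (t1 + (PN num lst).1, t2 + (PN num lst).2) := by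
  induction lst generalizing num t1 t2 with
  | nil => simp [darrOf_nil, PN]
  | cons x xs ih =>
    rw [darrOf_cons, List.foldl_cons]
    simp only [dstep, PN]
    split_ifs with h
    · rw [ih]; congr 1 <;> ring
    · rw [ih]; congr 1 <;> ring

lemma totLoop_eq_PN (prev t : Int) (lst : List Int) :
    totLoop prev t lst = t + (PN prev lst).1 + (PN prev lst).2 := by
  induction lst generalizing prev t with
  | nil => simp [totLoop, PN]
  | cons x xs ih =>
    simp only [totLoop, PN]
    rw [ih]
    by_cases h : x - prev > 0
    · rw [abs_of_pos h, if_pos h, if_pos h]; ring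
    · rw [abs_of_nonpos (by omega), if_neg h, if_neg h]; ring

lemma net_eq_PN (num : Int) (lst : List Int) (h : lst ≠ []) :
    PySem.List.pyGetD lst (-1) 0 - num = (PN num lst).1 - (PN num lst).2 := by
  induction lst generalizing num with
  | nil => exact absurd rfl h
  | cons x xs ih =>
    rw [PySem.List.pyGetD_neg_one (x :: xs) 0 (by simp)]
    cases xs with
    | nil =>
      simp only [List.getLast_singleton, PN]
      split_ifs <;> ring
    | cons y ys =>
      have hne : (y :: ys) ≠ [] := by simp
      have := ih x hne
      rw [PySem.List.pyGetD_neg_one (y :: ys) 0 hne] at this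
      rw [List.getLast_cons hne]
      simp only [PN] at this ⊢
      split_ifs at this ⊢ <;> omega

lemma fdiv_two_mul (p : Int) : PySem.Int.floordiv (2 * p) 2 = p := by
  rw [PySem.Int.floordiv_eq_ediv_of_pos (by norm_num)]
  exact Int.mul_ediv_cancel_left p (by norm_num)

-- ===== VERDICT (by name: the statement is the Claim_ definition above) =====
theorem solve_spec : Claim_equal_solve := by
  intro num lst _
  show solve num lst = solve_alt num lst
  have hA : solve num lst = ((PN num lst).1, (PN num lst).2) := by
    have h := foldl_darr_eq_PN num 0 0 lst
    simpa [solve, darrOf, dstep] using h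
  rw [hA]
  cases lst with
  | nil =>
    have h0 : PySem.Int.floordiv 0 2 = 0 := by simpa using fdiv_two_mul 0
    simp [PN, solve_alt, totLoop, h0]
  | cons x xs =>
    have hnet := net_eq_PN num (x :: xs) (by simp)
    have htot := totLoop_eq_PN num 0 (x :: xs)
    simp only [solve_alt]
    rw [if_neg (show ¬((x :: xs).isEmpty = true) by simp), htot, hnet]
    have e1 : 0 + (PN num (x :: xs)).1 + (PN num (x :: xs)).2
        + ((PN num (x :: xs)).1 - (PN num (x :: xs)).2) = 2 * (PN num (x :: xs)).1 := by ring
    have e2 : 0 + (PN num (x :: xs)).1 + (PN num (x :: xs)).2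
        - ((PN num (x :: xs)).1 - (PN num (x :: xs)).2) = 2 * (PN num (x :: xs)).2 := by ring
    rw [e1, e2, fdiv_two_mul, fdiv_two_mul]
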